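-- pv_equiv track=rewrite | github.com/abkozintsev/nand2tetris-lex-parser | lexer.py | findFirstEnd
-- ===== SOURCE A (Python) =====
-- symbols = {"(",")","[","]","{","}",",",";","=",".","+","-","*","/","&","|","","|","~","<",">"}
--
-- def findFirstEnd(file):
--     state = 0
--     for i in range(len(file)):
--         state = fsm(file[i], state)
--         #in some cases, such as identifiers and integer constants, we stop on landing on something not in the token, so return i
--         #in such instances the fsm returns -1
--         if state == -1:
--             return i
--         #in others, such as strings or symbols, we know that the next character will be the first not in the token, so return i+1
--         #in such instances the fsm returns -2
--         if state == -2: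
--             return i+1
--     #once the file is "" (all tokens stripped), the file will automatically close before this function is called
--     #this fails if the token is unclosed, which should theoretically never happen as any valid program will end in }, a monocharacter token
--     #the following line of code should only come up during debugging the parser, it just marks the end of the file as the end of the last token
--     #if we somehow got here (probably due to a simplified test case)
--     return i+1
--
-- def fsm(c, state):
--     #start of identifier/keyword
--     if state == 0 and c in "abcdefghijklmnopqrstuvwxyzABCDEFGHIJKLMNOPQRSTUVWXYZ":
--         return 1
--     #continue identifier/keyword
--     elif state == 1:
--         if c in "abcdefghijklmnopqrstuvwxyzABCDEFGHIJKLMNOPQRSTUVWXYZ1234567890_":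
--             return 1
--         return -1
--
--     #start of int
--     elif state == 0 and c in ("0123456789"):
--         return 11
--     #continue int
--     elif state == 11:
--         if c in ("0123456789"):
--             return 11
--         return -1
--
--     #if symbol, we know the next character must be the start of the next token, so return -2 (check for / seperately bcz block comment)
--     elif state == 0 and c in symbols and c != '/':
--         return -2
--
--     #start of string
--     elif state == 0 and c == '"':
--         return 21
--     #in string, did not just see backslash
--     elif state == 21:
--         if c == '"':
--             return -2
--         elif c == '\\':
--             return 22
--         return 21
--     #in string, just saw backslash
--     elif state == 22:
--         return 21
--
--     #potential start of comment
--     elif state == 0 and c == '/':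
--         return 30
--     #start of comment or end of symbol '/'
--     elif state == 30:
--         #block comment
--         if c == '*':
--             return 300
--         #line comment
--         elif c == '/':
--             return 310
--         #neither of above, so must be symbol '/'
--         else:
--             return -1
--     #in block comment, did not just see *
--     elif state == 300:
--         if c == '*':
--             return 301
--         else:
--             return 300
--     #in block comment, just saw *
--     elif state == 301:
--         if c == '/':
--             return -2
--         else:
--             return 300
--     #line comment handling
--     elif state == 310:
--         if c == '\n':
--             return -1
--         else:
--             return 310
--     elif c == ' ':
--         return -2
-- ===== SOURCE B (Python) =====
-- # Recursive-descent scanner: classify the first character, then consume the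
-- # token's tail with one dedicated loop per token class, returning the boundary
-- # index directly; an unexpected starting character is rejected with ValueError.
-- def findFirstEnd(file):
--     if not file:
--         raise ValueError("empty input")
--     n = len(file)
--     c = file[0]
--     if c.isalpha():
--         i = 1
--         while i < n and (file[i].isalnum() or file[i] == '_'):
--             i += 1
--         return i
--     if c.isdigit():
--         i = 1
--         while i < n and file[i].isdigit():
--             i += 1
--         return i
--     if c == '"':
--         i = 1
--         while i < n:
--             if file[i] == '"':
--                 return i + 1
--             i += 2 if file[i] == '\\' else 1
--         return n
--     if c == '/':
--         if file.startswith('/*'):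
--             i = 2
--             while i + 1 < n:
--                 if file[i] == '*' and file[i + 1] == '/':
--                     return i + 2
--                 i += 1
--             return n
--         if file.startswith('//'):
--             i = 2
--             while i < n and file[i] != '\n':
--                 i += 1
--             return i
--         return 1
--     if c in '()[]{},;=.+-*&|~<> ':
--         return 1
--     raise ValueError("unexpected character %r" % c)
-- ===== Notes on version B (the rewrite author's own statement) =====
-- stated objective: simpler
-- what changed: Replaced the per-character integer-state FSM dispatch with a recursive-descent scanner (classify the first character, one dedicated tail loop per token class, boundary returned directly); Pre_ excludes the empty string (A raises UnboundLocalError) and inputs starting with a character outside the lexer's alphabet (tab, '_', '#', ...), where B's input validation raises ValueError.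
-- intended difference: On block comments whose first '*/' is preceded by an even-length run of '*'s and is not at the end of the input (e.g. '/***/x'), A's state toggle consumes stars in pairs and scans past the closing '*/' (returning 6 on the witness), while B ends the comment at the first '*/' (returning 5), which is the standard comment rule. — e.g. on findFirstEnd("/***/x"): A returns 6, B returns 5
-- outside the precondition, e.g. on findFirstEnd('\tx y'): A returns 3, B raises ValueError; on findFirstEnd(''): A raises UnboundLocalError, B raises ValueError
import Mathlib
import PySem

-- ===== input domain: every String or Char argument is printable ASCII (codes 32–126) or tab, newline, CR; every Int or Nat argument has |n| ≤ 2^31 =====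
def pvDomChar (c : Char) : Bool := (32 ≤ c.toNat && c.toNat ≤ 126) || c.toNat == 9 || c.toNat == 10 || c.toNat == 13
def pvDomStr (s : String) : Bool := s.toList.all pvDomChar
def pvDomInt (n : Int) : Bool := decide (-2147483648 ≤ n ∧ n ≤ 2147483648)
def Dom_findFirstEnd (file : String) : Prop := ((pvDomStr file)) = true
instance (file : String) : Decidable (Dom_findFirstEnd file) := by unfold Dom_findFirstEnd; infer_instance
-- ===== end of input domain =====

-- B replaces A's integer-state FSM dispatch by a recursive-descent scanner (classify the
-- first character, one dedicated tail loop per token class); objective: simpler.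
-- B ends a block comment at the first "*/" (A's star toggle does not: see D_ below), and
-- rejects an unexpected starting character with ValueError (excluded by Pre_).

-- ===== PORT A =====
-- A's `symbols` set of strings; the "" element can never equal a one-character string,
-- so membership of a character is ported as membership in this char list.
def pvSymbolsA : List Char := "()[]{},;=.+-*/&|~<>".toList
def pvLettersA : List Char := "abcdefghijklmnopqrstuvwxyzABCDEFGHIJKLMNOPQRSTUVWXYZ".toList
def pvIdentA : List Char := "abcdefghijklmnopqrstuvwxyzABCDEFGHIJKLMNOPQRSTUVWXYZ1234567890_".toList
def pvDigitsA : List Char := "0123456789".toList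

-- fsm(c, state); Python's fall-through `return None` is `none`, int states are `some k`
def fsmA (c : Char) (state : Option Int) : Option Int :=
  if state = some 0 ∧ c ∈ pvLettersA then some 1
  else if state = some 1 then (if c ∈ pvIdentA then some 1 else some (-1))
  else if state = some 0 ∧ c ∈ pvDigitsA then some 11
  else if state = some 11 then (if c ∈ pvDigitsA then some 11 else some (-1))
  else if state = some 0 ∧ c ∈ pvSymbolsA ∧ c ≠ '/' then some (-2)
  else if state = some 0 ∧ c = '"' then some 21
  else if state = some 21 then
    (if c = '"' then some (-2) else if c = '\\' then some 22 else some 21)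
  else if state = some 22 then some 21
  else if state = some 0 ∧ c = '/' then some 30
  else if state = some 30 then
    (if c = '*' then some 300 else if c = '/' then some 310 else some (-1))
  else if state = some 300 then (if c = '*' then some 301 else some 300)
  else if state = some 301 then (if c = '/' then some (-2) else some 300)
  else if state = some 310 then (if c = '\n' then some (-1) else some 310)
  else if c = ' ' then some (-2)
  else none

-- the `for i in range(len(file))` loop; on exhaustion Python returns i+1 = len(file)
def pvLoopA : List Char → Int → Option Int → Int
  | [], i, _ => i
  | c :: rest, i, st =>
    let st' := fsmA c st
    if st' = some (-1) then i
    else if st' = some (-2) then i + 1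
    else pvLoopA rest (i + 1) st'

def findFirstEnd (file : String) : Int := pvLoopA file.toList 0 (some 0)

-- ===== PORT B =====
def pvScanIdent : List Char → Int → Int
  | [], i => i
  | c :: rest, i =>
    if (PySem.Chars.isalnum c || (c = '_')) = true then pvScanIdent rest (i + 1) else i

def pvScanDigits : List Char → Int → Int
  | [], i => i
  | c :: rest, i => if PySem.Chars.isdigit c = true then pvScanDigits rest (i + 1) else i

def pvScanStr : List Char → Int → Int
  | [], i => i
  | c :: rest, i =>
    if c = '"' then i + 1
    else if c = '\\' then
      match rest with
      | [] => i + 1                 -- i+2 overruns; the while loop then returns n = i+1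
      | _ :: rest' => pvScanStr rest' (i + 2)
    else pvScanStr rest (i + 1)

-- `while i+1 < n: if file[i]=='*' and file[i+1]=='/': return i+2; i+=1; return n`
def pvScanClose : List Char → Int → Int
  | '*' :: '/' :: _, i => i + 2
  | _ :: rest, i => pvScanClose rest (i + 1)
  | [], i => i

def pvScanLine : List Char → Int → Int
  | [], i => i
  | c :: rest, i => if c = '\n' then i else pvScanLine rest (i + 1)

def pvSymbolsSpace : List Char := "()[]{},;=.+-*&|~<> ".toList

-- the first-character dispatch of Source B; where Source B raises ValueError (empty input,
-- unexpected starting character — both outside Pre_) the port returns 0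
def pvDispatch (cs : List Char) : Int :=
  match cs with
  | [] => 0
  | c :: rest =>
    if PySem.Chars.isalpha c = true then pvScanIdent rest 1
    else if PySem.Chars.isdigit c = true then pvScanDigits rest 1
    else if c = '"' then pvScanStr rest 1
    else if c = '/' then
      match rest with
      | '*' :: r2 => pvScanClose r2 2
      | '/' :: r2 => pvScanLine r2 2
      | _ => 1
    else if c ∈ pvSymbolsSpace then 1
    else 0

def findFirstEnd_alt (file : String) : Int := pvDispatch file.toList

-- ===== PRECONDITION & SPEC =====
def pvStartChars : List Char := "()[]{},;=.+-*/&|~<> \"".toList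

-- Pre_ excludes the empty string, on which A raises UnboundLocalError, and inputs whose
-- first character is outside the lexer's alphabet (tab, '_', '#', ...), on which A's
-- fall-through None state scans until a space while B's validation raises ValueError.
def Pre_findFirstEnd (file : String) : Prop :=
  file.toList ≠ [] ∧
  (PySem.Chars.isalnum (file.toList.headD ' ') = true ∨ file.toList.headD ' ' ∈ pvStartChars)
instance (file : String) : Decidable (Pre_findFirstEnd file) := by unfold Pre_findFirstEnd; infer_instance
def pvWitness_findFirstEnd : String := "x+1"

-- `pvBadAux body r = true` iff the first "*/" in `body` is preceded by an even-length
-- run of '*'s (`r` stars already seen) and is not at the very end of the input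
def pvBadAux : List Char → Nat → Bool
  | [], _ => false
  | c :: rest, r =>
    if c = '*' ∧ rest.head? = some '/' then decide ((r + 1) % 2 = 0) && decide (2 ≤ rest.length)
    else if c = '*' then pvBadAux rest (r + 1)
    else pvBadAux rest 0

-- On block comments whose first "*/" is preceded by an even-length run of '*'s and is not
-- at the end of the input, A's state toggle consumes stars in pairs and scans past that
-- closing "*/" while B ends the comment there, which is the standard comment rule.
def D_findFirstEnd (file : String) : Prop :=
  file.toList.take 2 = ['/', '*'] ∧ pvBadAux (file.toList.drop 2) 0 = true
instance (file : String) : Decidable (D_findFirstEnd file) := by unfold D_findFirstEnd; infer_instance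

def Spec_findFirstEnd (file : String) (out : Int) : Prop :=
  ¬ D_findFirstEnd file → out = findFirstEnd_alt file
instance (file : String) (out : Int) : Decidable (Spec_findFirstEnd file out) := by unfold Spec_findFirstEnd; infer_instance

def pvDiffWitness_findFirstEnd : String := "/***/x"
def pvDiffWitnessOut_findFirstEnd : Int × Int := (6, 5)

-- ===== CLAIM (what is proved, stated in full; the proofs are below) =====
def Claim_unchanged_findFirstEnd : Prop := ∀ (file : String), Dom_findFirstEnd file → Pre_findFirstEnd file → Spec_findFirstEnd file (findFirstEnd file)
def Claim_changed_findFirstEnd : Prop := Dom_findFirstEnd (pvDiffWitness_findFirstEnd) ∧ Pre_findFirstEnd (pvDiffWitness_findFirstEnd) ∧ D_findFirstEnd (pvDiffWitness_findFirstEnd) ∧ findFirstEnd (pvDiffWitness_findFirstEnd) = pvDiffWitnessOut_findFirstEnd.1 ∧ findFirstEnd_alt (pvDiffWitness_findFirstEnd) = pvDiffWitnessOut_findFirstEnd.2 ∧ pvDiffWitnessOut_findFirstEnd.1 ≠ pvDiffWitnessOut_findFirstEnd.2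
def Claim_exact_findFirstEnd : Prop := ∀ (file : String), Dom_findFirstEnd file → Pre_findFirstEnd file → D_findFirstEnd file → findFirstEnd file ≠ findFirstEnd_alt file

-- ===== LEMMAS AND PROOFS =====

-- character-class bridge between A's explicit char lists and B's classifiers,
-- proved on the whole ASCII domain by decision
abbrev pvClassEq (c : Char) : Prop :=
  ((c ∈ pvLettersA) ↔ PySem.Chars.isalpha c = true) ∧
  ((c ∈ pvDigitsA) ↔ PySem.Chars.isdigit c = true) ∧
  (PySem.Chars.isalnum c = (PySem.Chars.isalpha c || PySem.Chars.isdigit c)) ∧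
  ((c ∈ pvIdentA) ↔ (PySem.Chars.isalnum c || (c = '_')) = true) ∧
  (c ∈ pvStartChars → c ≠ '"' → c ≠ '/' → (c ∈ pvSymbolsSpace ∧ (c = ' ' ∨ (c ∈ pvSymbolsA ∧ c ≠ '/'))))

set_option maxRecDepth 40000 in
theorem pvClassEq_fin : ∀ n : Fin 128, pvClassEq (Char.ofNat n.val) := by decide

theorem pvClassEq_of_dom (c : Char) (h : pvDomChar c = true) : pvClassEq c := by
  have hlt : c.toNat < 128 := by
    simp only [pvDomChar, Bool.or_eq_true, Bool.and_eq_true, decide_eq_true_eq, beq_iff_eq] at h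
    omega
  have hv : Char.ofNat c.toNat = c := Char.ofNat_toNat c
  have := pvClassEq_fin ⟨c.toNat, hlt⟩
  rwa [hv] at this

-- one-step evaluation lemmas for A's loop
theorem loopA_stop (c : Char) (rest : List Char) (i : Int) (st : Option Int)
    (hf : fsmA c st = some (-1)) : pvLoopA (c :: rest) i st = i := by
  simp [pvLoopA, hf]

theorem loopA_stop1 (c : Char) (rest : List Char) (i : Int) (st : Option Int)
    (hf : fsmA c st = some (-2)) : pvLoopA (c :: rest) i st = i + 1 := by
  simp [pvLoopA, hf]

theorem loopA_cont (c : Char) (rest : List Char) (i : Int) (st st' : Option Int)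
    (hf : fsmA c st = st') (h1 : st' ≠ some (-1)) (h2 : st' ≠ some (-2)) :
    pvLoopA (c :: rest) i st = pvLoopA rest (i + 1) st' := by
  simp only [pvLoopA, hf]
  rw [if_neg h1, if_neg h2]

-- state 1 ≡ identifier tail scan
theorem loop_ident (cs : List Char) (hd : cs.all pvDomChar = true) :
    ∀ i : Int, pvLoopA cs i (some 1) = pvScanIdent cs i := by
  induction cs with
  | nil => intro i; rfl
  | cons c rest ih =>
    intro i
    simp only [List.all_cons, Bool.and_eq_true] at hd
    have hce := pvClassEq_of_dom c hd.1
    by_cases hm : c ∈ pvIdentA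
    · have hf : fsmA c (some 1) = some 1 := by simp [fsmA, hm]
      rw [loopA_cont c rest i (some 1) (some 1) hf (by decide) (by decide), ih hd.2]
      simp [pvScanIdent, hce.2.2.2.1.mp hm]
    · have hf : fsmA c (some 1) = some (-1) := by simp [fsmA, hm]
      rw [loopA_stop c rest i (some 1) hf]
      have hb : (PySem.Chars.isalnum c || (c = '_')) ≠ true := fun h => hm (hce.2.2.2.1.mpr h)
      simp [pvScanIdent, hb]

-- state 11 ≡ digit tail scan
theorem loop_digits (cs : List Char) (hd : cs.all pvDomChar = true) :
    ∀ i : Int, pvLoopA cs i (some 11) = pvScanDigits cs i := by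
  induction cs with
  | nil => intro i; rfl
  | cons c rest ih =>
    intro i
    simp only [List.all_cons, Bool.and_eq_true] at hd
    have hce := pvClassEq_of_dom c hd.1
    by_cases hm : c ∈ pvDigitsA
    · have hf : fsmA c (some 11) = some 11 := by simp [fsmA, hm]
      rw [loopA_cont c rest i (some 11) (some 11) hf (by decide) (by decide), ih hd.2]
      simp [pvScanDigits, hce.2.1.mp hm]
    · have hf : fsmA c (some 11) = some (-1) := by simp [fsmA, hm]
      rw [loopA_stop c rest i (some 11) hf]
      have hb : PySem.Chars.isdigit c ≠ true := fun h => hm (hce.2.1.mpr h)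
      simp [pvScanDigits, hb]

-- states 21/22 ≡ string-literal tail scan (strong induction: the backslash case skips two)
theorem loop_str_n (n : Nat) : ∀ (cs : List Char), cs.length ≤ n →
    ∀ i : Int, pvLoopA cs i (some 21) = pvScanStr cs i := by
  induction n with
  | zero =>
    intro cs h i
    rw [Nat.le_zero, List.length_eq_zero_iff] at h
    subst h; rfl
  | succ n ih =>
    intro cs h i
    match cs with
    | [] => rfl
    | c :: rest =>
      simp only [List.length_cons, Nat.add_le_add_iff_right] at h
      by_cases hq : c = '"'
      · subst hq
        rw [loopA_stop1 '"' rest i (some 21) (by decide)]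
        conv_rhs => rw [pvScanStr.eq_def]
        simp
      · by_cases hb : c = '\\'
        · subst hb
          rw [loopA_cont '\\' rest i (some 21) (some 22) (by decide) (by decide) (by decide)]
          match rest with
          | [] =>
            conv_rhs => rw [pvScanStr.eq_def]
            simp [pvLoopA]
          | c' :: rest' =>
            rw [loopA_cont c' rest' (i + 1) (some 22) (some 21) (by simp [fsmA]) (by decide) (by decide)]
            rw [show i + 1 + 1 = i + 2 by ring]
            rw [ih rest' (by simp at h; omega) (i + 2)]
            conv_rhs => rw [pvScanStr.eq_def]
            simp
        · have hf : fsmA c (some 21) = some 21 := by simp [fsmA, hq, hb]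
          rw [loopA_cont c rest i (some 21) (some 21) hf (by decide) (by decide)]
          rw [ih rest h (i + 1)]
          conv_rhs => rw [pvScanStr.eq_def]
          simp [hq, hb]

theorem loop_str (cs : List Char) (i : Int) : pvLoopA cs i (some 21) = pvScanStr cs i :=
  loop_str_n cs.length cs le_rfl i

-- states 300/301 ≡ B's first-"*/" scan, given that the first "*/" is not a "bad" close:
-- `r` counts the stars of the current run already consumed (the toggle is its parity),
-- and an odd `r` implies the head is not '/' (the previous call consumed that case)
theorem loop_block_eq (cs : List Char) :
    ∀ (i : Int) (r : Nat), pvBadAux cs r = false →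
      (r % 2 = 1 → cs.head? ≠ some '/') →
      pvLoopA cs i (some (if r % 2 = 1 then 301 else 300)) = pvScanClose cs i := by
  induction cs with
  | nil => intro i r _ _; rcases Nat.mod_two_eq_zero_or_one r with h | h <;> simp [h, pvLoopA, pvScanClose]
  | cons c rest ih =>
    intro i r hbad hhd
    by_cases hc : c = '*'
    · subst hc
      cases rest with
      | nil =>
        rcases Nat.mod_two_eq_zero_or_one r with hr | hr <;>
          simp [hr, pvLoopA, fsmA, pvScanClose]
      | cons c' rest' =>
        by_cases hc2 : c' = '/'
        · subst hc2
          -- the first "*/" of the region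
          have hbad2 : ¬((r + 1) % 2 = 0) ∨ rest' = [] := by
            by_cases hp : (r + 1) % 2 = 0
            · right
              cases rest' with
              | nil => rfl
              | cons x xs => exfalso; simp [pvBadAux, hp] at hbad
            · left; exact hp
          rcases Nat.mod_two_eq_zero_or_one r with hr | hr
          · -- r even: the run including this star has odd length, A closes here like B
            have hs : (if r % 2 = 1 then (301 : Int) else 300) = 300 := by simp [hr]
            rw [hs]
            rw [loopA_cont '*' ('/' :: rest') i (some 300) (some 301) (by decide) (by decide) (by decide)]
            rw [loopA_stop1 '/' rest' (i + 1) (some 301) (by decide)]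
            simp [pvScanClose]; ring
          · -- r odd: even run; hbad forces rest' = [], both scans return n = i + 2
            have hr1 : (r + 1) % 2 = 0 := by omega
            have hrest : rest' = [] := by
              rcases hbad2 with h | h
              · exact absurd hr1 h
              · exact h
            subst hrest
            have hs : (if r % 2 = 1 then (301 : Int) else 300) = 301 := by simp [hr]
            rw [hs]
            rw [loopA_cont '*' ['/'] i (some 301) (some 300) (by decide) (by decide) (by decide)]
            rw [loopA_cont '/' [] (i + 1) (some 300) (some 300) (by decide) (by decide) (by decide)]
            simp [pvLoopA, pvScanClose]; ring
        · -- a star not starting "*/": consume it, the parity flips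
          have hbad' : pvBadAux (c' :: rest') (r + 1) = false := by
            simpa [pvBadAux, hc2] using hbad
          have hstep : fsmA '*' (some (if r % 2 = 1 then 301 else 300)) =
              some (if (r + 1) % 2 = 1 then 301 else 300) := by
            rcases Nat.mod_two_eq_zero_or_one r with hr | hr <;>
              simp [hr, Nat.add_mod, fsmA]
          rw [loopA_cont '*' (c' :: rest') i _ _ hstep
              (by rcases Nat.mod_two_eq_zero_or_one (r + 1) with h | h <;> simp [h])
              (by rcases Nat.mod_two_eq_zero_or_one (r + 1) with h | h <;> simp [h])]
          rw [ih (i + 1) (r + 1) hbad' (fun _ h => hc2 (by simpa using h))]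
          conv_rhs => rw [pvScanClose.eq_def]
          simp [hc2]
    · -- non-star head: from 300 or 301 it goes to 300 (an odd r cannot face '/')
      have hstep : fsmA c (some (if r % 2 = 1 then 301 else 300)) = some 300 := by
        rcases Nat.mod_two_eq_zero_or_one r with hr | hr
        · simp [hr, fsmA, hc]
        · have hne : c ≠ '/' := fun h => hhd hr (by rw [h]; rfl)
          simp [hr, fsmA, hc, hne]
      rw [loopA_cont c rest i _ (some 300) hstep (by decide) (by decide)]
      have hbad' : pvBadAux rest 0 = false := by
        simpa [pvBadAux, hc] using hbad
      have h2 := ih (i + 1) 0 hbad' (by omega)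
      rw [if_neg (by omega)] at h2
      rw [h2]
      conv_rhs => rw [pvScanClose.eq_def]
      simp [hc]


-- from the block-comment states A's loop never returns an index below the current one
theorem loopA_ge (cs : List Char) :
    ∀ i : Int, i ≤ pvLoopA cs i (some 300) ∧ i ≤ pvLoopA cs i (some 301) := by
  induction cs with
  | nil => intro i; constructor <;> simp [pvLoopA]
  | cons c rest ih =>
    intro i
    obtain ⟨h0, h1⟩ := ih (i + 1)
    constructor
    · by_cases hc : c = '*'
      · subst hc
        rw [loopA_cont '*' rest i (some 300) (some 301) (by decide) (by decide) (by decide)]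
        omega
      · rw [loopA_cont c rest i (some 300) (some 300) (by simp [fsmA, hc]) (by decide) (by decide)]
        omega
    · by_cases hc : c = '/'
      · subst hc
        rw [loopA_stop1 '/' rest i (some 301) (by decide)]
        omega
      · rw [loopA_cont c rest i (some 301) (some 300) (by simp [fsmA, hc]) (by decide) (by decide)]
        omega

-- inside the change region A's toggle scan overshoots B's first-"*/" scan strictly
theorem loop_block_lt (cs : List Char) :
    ∀ (i : Int) (r : Nat), pvBadAux cs r = true →
      (r % 2 = 1 → cs.head? ≠ some '/') →
      pvScanClose cs i < pvLoopA cs i (some (if r % 2 = 1 then 301 else 300)) := by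
  induction cs with
  | nil => intro i r hbad _; simp [pvBadAux] at hbad
  | cons c rest ih =>
    intro i r hbad hhd
    by_cases hc : c = '*'
    · subst hc
      cases rest with
      | nil => simp [pvBadAux] at hbad
      | cons c' rest' =>
        by_cases hc2 : c' = '/'
        · subst hc2
          -- the bad close: even star run, something after; A scans past it
          simp [pvBadAux] at hbad
          obtain ⟨hr1, hlen⟩ := hbad
          have hr : r % 2 = 1 := by omega
          have hs : (if r % 2 = 1 then (301 : Int) else 300) = 301 := by simp [hr]
          rw [hs]
          rw [loopA_cont '*' ('/' :: rest') i (some 301) (some 300) (by decide) (by decide) (by decide)]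
          rw [loopA_cont '/' rest' (i + 1) (some 300) (some 300) (by decide) (by decide) (by decide)]
          cases rest' with
          | nil => simp at hlen
          | cons x xs =>
            have hge : i + 1 + 1 + 1 ≤ pvLoopA (x :: xs) (i + 1 + 1) (some 300) := by
              by_cases hx : x = '*'
              · subst hx
                rw [loopA_cont '*' xs (i + 1 + 1) (some 300) (some 301) (by decide) (by decide) (by decide)]
                exact (loopA_ge xs (i + 1 + 1 + 1)).2
              · rw [loopA_cont x xs (i + 1 + 1) (some 300) (some 300) (by simp [fsmA, hx]) (by decide) (by decide)]
                exact (loopA_ge xs (i + 1 + 1 + 1)).1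
            have hB : pvScanClose ('*' :: '/' :: x :: xs) i = i + 2 := rfl
            rw [hB]; omega
        · have hbad' : pvBadAux (c' :: rest') (r + 1) = true := by
            simpa [pvBadAux, hc2] using hbad
          have hstep : fsmA '*' (some (if r % 2 = 1 then 301 else 300)) =
              some (if (r + 1) % 2 = 1 then 301 else 300) := by
            rcases Nat.mod_two_eq_zero_or_one r with hr | hr <;>
              simp [hr, Nat.add_mod, fsmA]
          rw [loopA_cont '*' (c' :: rest') i _ _ hstep
              (by rcases Nat.mod_two_eq_zero_or_one (r + 1) with h | h <;> simp [h])
              (by rcases Nat.mod_two_eq_zero_or_one (r + 1) with h | h <;> simp [h])]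
          have := ih (i + 1) (r + 1) hbad' (fun _ h => hc2 (by simpa using h))
          have hB : pvScanClose ('*' :: c' :: rest') i = pvScanClose (c' :: rest') (i + 1) := by
            conv_lhs => rw [pvScanClose.eq_def]
            simp [hc2]
          rw [hB]; omega
    · have hstep : fsmA c (some (if r % 2 = 1 then 301 else 300)) = some 300 := by
        rcases Nat.mod_two_eq_zero_or_one r with hr | hr
        · simp [hr, fsmA, hc]
        · have hne : c ≠ '/' := fun h => hhd hr (by rw [h]; rfl)
          simp [hr, fsmA, hne]
      rw [loopA_cont c rest i _ (some 300) hstep (by decide) (by decide)]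
      have hbad' : pvBadAux rest 0 = true := by
        simpa [pvBadAux, hc] using hbad
      have := ih (i + 1) 0 hbad' (by omega)
      rw [if_neg (by omega)] at this
      have hB : pvScanClose (c :: rest) i = pvScanClose rest (i + 1) := by
        conv_lhs => rw [pvScanClose.eq_def]
        simp [hc]
      rw [hB]; omega

-- state 310 ≡ line-comment tail scan
theorem loop_line (cs : List Char) : ∀ i : Int, pvLoopA cs i (some 310) = pvScanLine cs i := by
  induction cs with
  | nil => intro i; rfl
  | cons c rest ih =>
    intro i
    by_cases hc : c = '\n'
    · subst hc
      rw [loopA_stop '\n' rest i (some 310) (by decide)]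
      simp [pvScanLine]
    · have hf : fsmA c (some 310) = some 310 := by simp [fsmA, hc]
      rw [loopA_cont c rest i (some 310) (some 310) hf (by decide) (by decide), ih (i + 1)]
      simp [pvScanLine, hc]

-- ===== VERDICT (by name: the statements are the Claim_ definitions above) =====
theorem findFirstEnd_spec : Claim_unchanged_findFirstEnd := by
  intro file hdom hpre hnd
  unfold findFirstEnd findFirstEnd_alt
  have hdl : file.toList.all pvDomChar = true := hdom
  obtain ⟨hne, hstart⟩ := hpre
  cases hfl : file.toList with
  | nil => exact absurd hfl hne
  | cons c rest =>
    rw [hfl] at hdl hstart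
    simp only [List.all_cons, Bool.and_eq_true] at hdl
    simp only [List.headD_cons] at hstart
    have hce := pvClassEq_of_dom c hdl.1
    simp only [pvDispatch]
    by_cases h1 : c ∈ pvLettersA
    · have hf : fsmA c (some 0) = some 1 := by simp [fsmA, h1]
      rw [loopA_cont c rest 0 (some 0) (some 1) hf (by decide) (by decide)]
      rw [show (0:Int) + 1 = 1 by ring, loop_ident rest hdl.2]
      rw [if_pos (hce.1.mp h1)]
    · have hA : PySem.Chars.isalpha c ≠ true := fun h => h1 (hce.1.mpr h)
      rw [if_neg hA]
      by_cases h2 : c ∈ pvDigitsA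
      · have hf : fsmA c (some 0) = some 11 := by simp [fsmA, h1, h2]
        rw [loopA_cont c rest 0 (some 0) (some 11) hf (by decide) (by decide)]
        rw [show (0:Int) + 1 = 1 by ring, loop_digits rest hdl.2]
        rw [if_pos (hce.2.1.mp h2)]
      · have hD : PySem.Chars.isdigit c ≠ true := fun h => h2 (hce.2.1.mpr h)
        rw [if_neg hD]
        by_cases h4 : c = '"'
        · subst h4
          have hf : fsmA '"' (some 0) = some 21 := by decide
          rw [loopA_cont '"' rest 0 (some 0) (some 21) hf (by decide) (by decide)]
          rw [show (0:Int) + 1 = 1 by ring, loop_str rest 1, if_pos rfl]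
        · rw [if_neg h4]
          by_cases h5 : c = '/'
          · subst h5
            have hf : fsmA '/' (some 0) = some 30 := by decide
            rw [loopA_cont '/' rest 0 (some 0) (some 30) hf (by decide) (by decide), if_pos rfl]
            rw [show (0:Int) + 1 = 1 by ring]
            cases rest with
            | nil => rfl
            | cons d r2 =>
              by_cases hd1 : d = '*'
              · subst hd1
                rw [loopA_cont '*' r2 1 (some 30) (some 300) (by decide) (by decide) (by decide)]
                rw [show (1:Int) + 1 = 2 by ring]
                have hb : pvBadAux r2 0 = false := by
                  rw [D_findFirstEnd, hfl] at hnd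
                  simpa using hnd
                have h3 := loop_block_eq r2 2 0 hb (by omega)
                rw [if_neg (by omega)] at h3
                rw [h3]
                rfl
              · by_cases hd2 : d = '/'
                · subst hd2
                  rw [loopA_cont '/' r2 1 (some 30) (some 310) (by decide) (by decide) (by decide)]
                  rw [show (1:Int) + 1 = 2 by ring, loop_line r2 2]
                  rfl
                · have hf2 : fsmA d (some 30) = some (-1) := by simp [fsmA, hd1, hd2]
                  rw [loopA_stop d r2 1 (some 30) hf2]
                  simp [hd1, hd2]
          · rw [if_neg h5]
            -- remaining starts: from Pre_, c is in the start alphabet; not alnum, '"', '/'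
            have hcm : c ∈ pvStartChars := by
              rcases hstart with h | h
              · rw [hce.2.2.1] at h
                simp [hA, hD] at h
              · exact h
            obtain ⟨hmemB, hAside⟩ := hce.2.2.2.2 hcm h4 h5
            rw [if_pos hmemB]
            rcases hAside with hsp | ⟨hsym, _⟩
            · subst hsp
              rw [loopA_stop1 ' ' rest 0 (some 0) (by decide)]
              ring
            · have hf : fsmA c (some 0) = some (-2) := by
                simp [fsmA, h1, h2, hsym, h5]
              rw [loopA_stop1 c rest 0 (some 0) hf]
              ring

theorem findFirstEnd_changed : Claim_changed_findFirstEnd := by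
  unfold Claim_changed_findFirstEnd; decide

theorem findFirstEnd_tight : Claim_exact_findFirstEnd := by
  intro file _ _ hD
  obtain ⟨ht, hb⟩ := hD
  cases hfl : file.toList with
  | nil => rw [hfl] at ht; simp at ht
  | cons a rest =>
    cases rest with
    | nil => rw [hfl] at ht; simp at ht
    | cons b r2 =>
      rw [hfl] at ht hb
      simp only [List.take, List.cons.injEq, and_true] at ht
      obtain ⟨ha, hb2⟩ := ht
      subst ha; subst hb2
      have hA : findFirstEnd file = pvLoopA r2 2 (some 300) := by
        unfold findFirstEnd
        rw [hfl]
        rw [loopA_cont '/' ('*' :: r2) 0 (some 0) (some 30) (by decide) (by decide) (by decide)]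
        rw [loopA_cont '*' r2 (0 + 1) (some 30) (some 300) (by decide) (by decide) (by decide)]
        norm_num
      have hB : findFirstEnd_alt file = pvScanClose r2 2 := by
        unfold findFirstEnd_alt
        rw [hfl]
        rfl
      have hlt := loop_block_lt r2 2 0 (by simpa using hb) (by omega)
      rw [if_neg (by omega)] at hlt
      rw [hA, hB]
      omega
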